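-- pv_equiv track=rewrite | github.com/woudc/woudc-data-registry | woudc_data_registry/notification/acknowledge_submission.py | map_files
-- ===== SOURCE A (Python) =====
-- def map_files(acknowledged):
--     """helper function to map contributors to files"""
--
--     contributor_dict = {}
--     for item in acknowledged:
--         if item['contributor'] not in contributor_dict:
--             contributor_dict[item['contributor']] = []
--         contributor_dict[item['contributor']].append(
--             item['ipath'].split('/')[-1]
--         )
--     return contributor_dict
-- ===== SOURCE B (Python) =====
-- def map_files(acknowledged):
--     """helper function to map contributors to files"""
--
--     contributors = list(dict.fromkeys(
--         item['contributor'] for item in acknowledged))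
--     return {
--         c: [item['ipath'].split('/')[-1]
--             for item in acknowledged if item['contributor'] == c]
--         for c in contributors
--     }
-- ===== Notes on version B (the rewrite author's own statement) =====
-- stated objective: alternative
-- what changed: Replaces the single-pass dict accumulation with a two-phase grouping: an ordered dedup of the contributor keys, then one dict comprehension that collects each contributor's basenames by filtering the whole list per key.
import Mathlib
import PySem

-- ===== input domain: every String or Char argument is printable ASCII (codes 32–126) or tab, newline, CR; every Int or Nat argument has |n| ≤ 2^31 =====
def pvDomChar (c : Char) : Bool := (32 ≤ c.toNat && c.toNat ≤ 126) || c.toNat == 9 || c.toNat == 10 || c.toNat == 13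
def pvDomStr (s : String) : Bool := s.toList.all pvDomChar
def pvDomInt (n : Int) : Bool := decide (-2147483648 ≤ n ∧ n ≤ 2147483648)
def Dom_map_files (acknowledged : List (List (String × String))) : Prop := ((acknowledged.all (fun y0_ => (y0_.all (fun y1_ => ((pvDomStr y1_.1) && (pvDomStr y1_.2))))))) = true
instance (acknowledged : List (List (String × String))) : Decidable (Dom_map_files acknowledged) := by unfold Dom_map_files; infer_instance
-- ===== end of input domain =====

-- B replaces A's one-pass dict accumulation by an ordered dedup of contributors plus a
-- per-contributor filter (a different decomposition of the grouping, not faster).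

-- ===== PORT A =====
-- item['contributor'] / item['ipath']: under Pre_map_files both keys are present, so getD's
-- default is never used and the lookup is exact (first match, as Python's dict).
def pyKey (it : List (String × String)) : String :=
  (PySem.Dict.mk it).getD "contributor" ""

-- item['ipath'].split('/')[-1]: split? with the nonempty separator "/" always returns a
-- nonempty some-list, so both defaults are unreachable and the port is exact.
def pyBase (it : List (String × String)) : String :=
  PySem.List.pyGetD ((PySem.Str.split? ((PySem.Dict.mk it).getD "ipath" "") "/").getD []) (-1) ""

def map_files (acknowledged : List (List (String × String))) : List (String × List String) :=
  (acknowledged.foldl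
    (fun d it =>
      let c := pyKey it
      let d := if d.contains c then d else d.insert c ([] : List String)
      d.modify c [] (fun l => l ++ [pyBase it]))
    PySem.Dict.empty).items

-- ===== PORT B =====
def map_files_alt (acknowledged : List (List (String × String))) : List (String × List String) :=
  (PySem.List.dedup (acknowledged.map pyKey)).map
    (fun c => (c, (acknowledged.filter (fun it => pyKey it == c)).map pyBase))

-- ===== PRECONDITION & SPEC =====
-- Pre_ excludes exactly the items missing a 'contributor' or 'ipath' key, on which Python A raises KeyError.
def Pre_map_files (acknowledged : List (List (String × String))) : Prop :=
  (acknowledged.all (fun it =>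
    ((PySem.Dict.mk it).get? "contributor").isSome
      && ((PySem.Dict.mk it).get? "ipath").isSome)) = true
instance (acknowledged : List (List (String × String))) : Decidable (Pre_map_files acknowledged) := by
  unfold Pre_map_files; infer_instance

def pvWitness_map_files : (List (List (String × String))) :=
  [[("contributor", "msc"), ("ipath", "data/2020/file1.csv")],
   [("contributor", "msc"), ("ipath", "data/2020/file2.csv")],
   [("contributor", "dwd"), ("ipath", "f.dat")]]

def Spec_map_files (acknowledged : List (List (String × String))) (out : List (String × List String)) : Prop := out = map_files_alt acknowledged
instance (acknowledged : List (List (String × String))) (out : List (String × List String)) : Decidable (Spec_map_files acknowledged out) := by unfold Spec_map_files; infer_instance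

-- ===== CLAIM (what is proved, stated in full; the proofs are below) =====
def Claim_equal_map_files : Prop := ∀ (acknowledged : List (List (String × String))), Dom_map_files acknowledged → Pre_map_files acknowledged → Spec_map_files acknowledged (map_files acknowledged)

-- ===== LEMMAS AND PROOFS =====

-- A's 'if c not in d: d[c] = []' followed by the append collapses to a single modify.
theorem condInsert_modify (d : PySem.Dict String (List String)) (c b : String) :
    (if d.contains c then d else d.insert c ([] : List String)).modify c []
        (fun l => l ++ [b])
      = d.modify c [] (fun l => l ++ [b]) := by
  by_cases h : d.contains c = true
  · simp [h]
  · simp only [h, Bool.false_eq_true, ite_false]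
    simp [PySem.Dict.modify, PySem.Dict.getD_insert_self, PySem.Dict.insert_insert_self,
      PySem.Dict.getD_of_not_contains d ([] : List String) (by simpa using h)]

theorem map_files_eq_modify_fold (acknowledged : List (List (String × String))) :
    map_files acknowledged
      = ((acknowledged.map (fun it => (pyKey it, pyBase it))).foldl
          (fun d p => d.modify p.1 [] (fun l => l ++ [p.2])) PySem.Dict.empty).items := by
  unfold map_files
  rw [List.foldl_map]
  congr 2
  funext d it
  exact condInsert_modify d (pyKey it) (pyBase it)

theorem map_files_spec_aux (acknowledged : List (List (String × String))) :
    map_files acknowledged = map_files_alt acknowledged := by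
  rw [map_files_eq_modify_fold]
  set pairs := acknowledged.map (fun it => (pyKey it, pyBase it)) with hpairs
  set D := pairs.foldl (fun d p => d.modify p.1 [] (fun l => l ++ [p.2])) PySem.Dict.empty with hD
  have hnd : D.keys.Nodup := by
    rw [hD]
    exact PySem.Dict.nodup_keys_foldl_modify_key pairs (fun p => p.1) []
      (fun _ p l => l ++ [p.2]) PySem.Dict.empty (by simp)
  have hkeys : D.keys = PySem.List.dedup (acknowledged.map pyKey) := by
    rw [hD, PySem.Dict.keys_foldl_modify_key pairs (fun p => p.1) []
      (fun _ p l => l ++ [p.2]) PySem.Dict.empty]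
    simp [hpairs, PySem.Set.update_nil_left, List.map_map, Function.comp_def]
  have hgetD : ∀ c, D.getD c [] =
      (acknowledged.filter (fun it => pyKey it == c)).map pyBase := by
    intro c
    rw [hD, PySem.Dict.getD_foldl_modify_append pairs PySem.Dict.empty c]
    simp [hpairs, List.filter_map, List.map_map, Function.comp_def]
  rw [PySem.Dict.items_eq_map_keys D hnd ([] : List String), hkeys]
  unfold map_files_alt
  exact List.map_congr_left (fun c _ => by rw [hgetD c])

-- ===== VERDICT (by name: the statement is the Claim_ definition above) =====
theorem map_files_spec : Claim_equal_map_files := by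
  intro acknowledged _ _
  exact map_files_spec_aux acknowledged
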